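-- pv_equiv track=rewrite | github.com/texikator/algo_and_structures_python | 3.py | get_mediana
-- ===== SOURCE A (Python) =====
-- def get_mediana(array):
--     for c_item in range(len(array)):
--         left_array = []
--         right_array = []
--
--         for item in array:
--             if item < array[c_item]:
--                 left_array.append(item)
--             elif item > array[c_item]:
--                 right_array.append(item)
--
--         if len(left_array) == len(right_array):
--             return array[c_item]
-- ===== SOURCE B (Python) =====
-- def get_mediana(array):
--     s = sorted(array)
--     n = len(s)
--     i = 0
--     while i < n:
--         j = i
--         while j < n and s[j] == s[i]:
--             j += 1
--         # run s[i:j] of equal values: i elements are strictly smaller,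
--         # n - j elements are strictly greater
--         if i == n - j:
--             return s[i]
--         i = j
--     return None
-- ===== Notes on version B (the rewrite author's own statement) =====
-- stated objective: faster
-- what changed: Instead of re-scanning the whole array for every candidate index (quadratic), B sorts once and walks the runs of equal values, where the run boundaries directly give the strictly-less and strictly-greater counts; the satisfying value is unique, so the first satisfying run is A's answer.
import Mathlib
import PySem

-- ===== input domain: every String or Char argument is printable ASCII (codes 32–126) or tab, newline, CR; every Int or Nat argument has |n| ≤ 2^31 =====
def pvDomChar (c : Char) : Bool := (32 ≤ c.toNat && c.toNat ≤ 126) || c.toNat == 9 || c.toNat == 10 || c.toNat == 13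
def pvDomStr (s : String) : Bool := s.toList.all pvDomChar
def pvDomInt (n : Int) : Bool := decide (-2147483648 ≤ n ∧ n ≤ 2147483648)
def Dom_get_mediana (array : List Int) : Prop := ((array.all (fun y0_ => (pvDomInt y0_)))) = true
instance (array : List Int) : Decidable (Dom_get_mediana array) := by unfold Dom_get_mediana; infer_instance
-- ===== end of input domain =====

-- B replaces A's quadratic rescan-per-candidate by one sort followed by a single walk
-- over runs of equal values (objective: faster, O(n log n) vs O(n^2)).

-- ===== PORT A =====
-- inner loop: build left_array / right_array by appending
def pvLR (array : List Int) (pivot : Int) : List Int × List Int :=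
  array.foldl (fun lr item =>
    if item < pivot then (lr.1 ++ [item], lr.2)
    else if item > pivot then (lr.1, lr.2 ++ [item])
    else lr) ([], [])

-- outer loop over c_item in range(len(array)); indices are always in range, so
-- array[c_item] is ported as array.getD c 0 (the default 0 is never used)
def pvALoop (array : List Int) : List Nat → Option Int
  | [] => none
  | c :: cs =>
      if (pvLR array (array.getD c 0)).1.length == (pvLR array (array.getD c 0)).2.length
      then some (array.getD c 0) else pvALoop array cs

def get_mediana (array : List Int) : Option Int :=
  pvALoop array (List.range array.length)

-- ===== PORT B =====
-- outer while loop of Source B: s is the unprocessed suffix of the sorted list,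
-- i the index of its first element, n the total length; the inner while loop
-- (advance j over equal elements) is the takeWhile/dropWhile split of the run
def pvRunLoop (n : Int) (i : Int) : List Int → Option Int
  | [] => none
  | v :: rest =>
      if i = n - (i + ((v :: rest).takeWhile (fun x => x == v)).length)
      then some v
      else pvRunLoop n (i + ((v :: rest).takeWhile (fun x => x == v)).length)
             ((v :: rest).dropWhile (fun x => x == v))
  termination_by s => s.length
  decreasing_by
    simp
    exact List.length_dropWhile_le _ _

def get_mediana_alt (array : List Int) : Option Int :=
  pvRunLoop ((PySem.List.sorted array (fun x => x) false).length : Int) 0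
    (PySem.List.sorted array (fun x => x) false)

-- ===== PRECONDITION & SPEC =====
def Spec_get_mediana (array : List Int) (out : Option Int) : Prop := out = get_mediana_alt array
instance (array : List Int) (out : Option Int) : Decidable (Spec_get_mediana array out) := by unfold Spec_get_mediana; infer_instance

-- ===== CLAIM (what is proved, stated in full; the proofs are below) =====
def Claim_equal_get_mediana : Prop := ∀ (array : List Int), Dom_get_mediana array → Spec_get_mediana array (get_mediana array)

-- ===== LEMMAS AND PROOFS =====

-- the balance predicate: as many elements strictly below v as strictly above
def pvP (l : List Int) (v : Int) : Prop :=
  l.countP (fun x => decide (x < v)) = l.countP (fun x => decide (v < x))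

def pvPb (l : List Int) (v : Int) : Bool :=
  l.countP (fun x => decide (x < v)) == l.countP (fun x => decide (v < x))

lemma pvPb_iff (l : List Int) (v : Int) : pvPb l v = true ↔ pvP l v := by
  simp [pvPb, pvP]

lemma pvLR_gen (p : Int) : ∀ (l a b : List Int),
    l.foldl (fun lr item =>
      if item < p then (lr.1 ++ [item], lr.2)
      else if item > p then (lr.1, lr.2 ++ [item])
      else lr) (a, b)
    = (a ++ l.filter (fun x => decide (x < p)), b ++ l.filter (fun x => decide (p < x))) := by
  intro l
  induction l with
  | nil => simp
  | cons x t ih =>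
    intro a b
    rcases lt_trichotomy x p with h | h | h
    · have h2 : ¬ p < x := by omega
      simp [List.foldl_cons, h, h2, ih]
    · have h1 : ¬ x < p := by omega
      have h2 : ¬ p < x := by omega
      simp [List.foldl_cons, h1, h2, ih]
    · have h1 : ¬ x < p := by omega
      simp [List.foldl_cons, h1, h, ih]

lemma pvLR_eq (array : List Int) (p : Int) :
    pvLR array p = (array.filter (fun x => decide (x < p)),
                    array.filter (fun x => decide (p < x))) := by
  unfold pvLR
  simpa using pvLR_gen p array [] []

lemma aLoop_eq_find (array : List Int) : ∀ idxs : List Nat,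
    pvALoop array idxs = (idxs.map (fun c => array.getD c 0)).find? (pvPb array) := by
  have hpred : ∀ q : Int,
      ((pvLR array q).1.length == (pvLR array q).2.length) = pvPb array q := by
    intro q
    rw [pvLR_eq]
    simp [pvPb, List.countP_eq_length_filter]
  intro idxs
  induction idxs with
  | nil => simp [pvALoop]
  | cons c cs ih =>
    rw [List.map_cons, List.find?_cons]
    rw [show pvALoop array (c :: cs) =
        if (pvLR array (array.getD c 0)).1.length == (pvLR array (array.getD c 0)).2.length
        then some (array.getD c 0) else pvALoop array cs from rfl]
    rw [hpred]
    cases h : pvPb array (array.getD c 0) <;> simp [ih]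

lemma map_getD_range : ∀ l : List Int,
    (List.range l.length).map (fun c => l.getD c 0) = l := by
  intro l
  induction l with
  | nil => simp
  | cons a t ih =>
    rw [List.length_cons, List.range_succ_eq_map, List.map_cons, List.map_map]
    have : ((fun c => (a :: t).getD c 0) ∘ Nat.succ) = (fun c => t.getD c 0) := by
      funext c; simp
    rw [this, ih]
    simp

lemma A_eq_find (array : List Int) : get_mediana array = array.find? (pvPb array) := by
  rw [get_mediana, aLoop_eq_find, map_getD_range]

lemma countP_le_split : ∀ (l : List Int) (v : Int),
    l.countP (fun x => decide (x ≤ v)) = l.countP (fun x => decide (x < v)) + l.count v := by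
  intro l v
  induction l with
  | nil => simp
  | cons x t ih =>
    simp only [List.countP_cons, List.count_cons, ih, beq_iff_eq]
    split_ifs <;> simp_all <;> omega

lemma countP_ge_split : ∀ (l : List Int) (v : Int),
    l.countP (fun x => decide (v ≤ x)) = l.countP (fun x => decide (v < x)) + l.count v := by
  intro l v
  induction l with
  | nil => simp
  | cons x t ih =>
    simp only [List.countP_cons, List.count_cons, ih, beq_iff_eq]
    split_ifs <;> simp_all <;> omega

lemma pvP_lt_absurd {l : List Int} {v w : Int} (hvw : v < w)
    (hv : v ∈ l) (hw : w ∈ l) (hPv : pvP l v) (hPw : pvP l w) : False := by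
  have h1 : l.countP (fun x => decide (x ≤ v)) ≤ l.countP (fun x => decide (x < w)) :=
    List.countP_mono_left (by intro a _ ha; simp at ha ⊢; omega)
  have h2 : l.countP (fun x => decide (w ≤ x)) ≤ l.countP (fun x => decide (v < x)) :=
    List.countP_mono_left (by intro a _ ha; simp at ha ⊢; omega)
  have hc1 : 0 < l.count v := List.count_pos_iff.mpr hv
  have hc2 : 0 < l.count w := List.count_pos_iff.mpr hw
  have e1 := countP_le_split l v
  have e2 := countP_ge_split l w
  unfold pvP at hPv hPw
  omega

lemma pvP_unique {l : List Int} {v w : Int}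
    (hv : v ∈ l) (hw : w ∈ l) (hPv : pvP l v) (hPw : pvP l w) : v = w := by
  rcases lt_trichotomy v w with h | h | h
  · exact absurd (pvP_lt_absurd h hv hw hPv hPw) (by simp)
  · exact h
  · exact absurd (pvP_lt_absurd h hw hv hPw hPv) (by simp)

lemma dropWhile_bound_gt (v : Int) : ∀ l : List Int, l.Pairwise (· ≤ ·) →
    (∀ y ∈ l, v ≤ y) → ∀ y ∈ l.dropWhile (fun x => x == v), v < y := by
  intro l
  induction l with
  | nil => simp
  | cons a t ih =>
    intro hp hlb y hy
    rw [List.dropWhile_cons] at hy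
    by_cases ha : a = v
    · rw [if_pos (by simp [ha])] at hy
      exact ih (List.pairwise_cons.mp hp).2 (fun z hz => hlb z (List.mem_cons_of_mem _ hz)) y hy
    · rw [if_neg (by simp [ha])] at hy
      have hva : v < a := lt_of_le_of_ne (hlb a List.mem_cons_self) (Ne.symm ha)
      rcases List.mem_cons.mp hy with h | h
      · exact h ▸ hva
      · exact lt_of_lt_of_le hva ((List.pairwise_cons.mp hp).1 y h)

lemma runLoop_spec (s0 : List Int) (hp : s0.Pairwise (· ≤ ·)) :
    ∀ (k : Nat) (s t : List Int), s.length ≤ k → s0 = t ++ s →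
      (∀ x ∈ t, ∀ y ∈ s, x < y) →
      ((∀ v, pvRunLoop (s0.length : Int) (t.length : Int) s = some v → v ∈ s ∧ pvP s0 v) ∧
       (pvRunLoop (s0.length : Int) (t.length : Int) s = none → ∀ v ∈ s, ¬ pvP s0 v)) := by
  intro k
  induction k with
  | zero =>
    intro s t hle heq hlt
    have hs : s = [] := List.eq_nil_of_length_eq_zero (Nat.le_zero.mp hle)
    subst hs
    refine ⟨fun v hv => by simp [pvRunLoop] at hv, fun _ v hv => by simp at hv⟩
  | succ k ih =>
    intro s t hle heq hlt
    match s with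
    | [] =>
      refine ⟨fun v hv => by simp [pvRunLoop] at hv, fun _ v hv => by simp at hv⟩
    | v :: rest =>
      have hrd : (v :: rest).takeWhile (fun x => x == v) ++ (v :: rest).dropWhile (fun x => x == v)
          = v :: rest := List.takeWhile_append_dropWhile
      set r := (v :: rest).takeWhile (fun x => x == v) with hr
      set d := (v :: rest).dropWhile (fun x => x == v) with hd
      have hpair_s : (v :: rest).Pairwise (· ≤ ·) := by
        have h' : (t ++ (v :: rest)).Pairwise (· ≤ ·) := heq ▸ hp
        exact (List.pairwise_append.mp h').2.1
      have hvle : ∀ y ∈ v :: rest, v ≤ y := by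
        intro y hy
        rcases List.mem_cons.mp hy with h | h
        · exact le_of_eq h.symm
        · exact (List.pairwise_cons.mp hpair_s).1 y h
      have hrv : ∀ x ∈ r, x = v := by
        intro x hx
        have := List.mem_takeWhile_imp hx
        simpa using this
      have hdgt : ∀ y ∈ d, v < y := by
        rw [hd]
        exact dropWhile_bound_gt v (v :: rest) hpair_s hvle
      have htlt : ∀ x ∈ t, x < v := fun x hx => hlt x hx v List.mem_cons_self
      have hcountL : s0.countP (fun x => decide (x < v)) = t.length := by
        rw [heq, List.countP_append]
        have h1 : t.countP (fun x => decide (x < v)) = t.length :=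
          List.countP_eq_length.mpr (fun a ha => by simpa using htlt a ha)
        have h2 : (v :: rest).countP (fun x => decide (x < v)) = 0 :=
          List.countP_eq_zero.mpr (fun a ha => by simpa using not_lt.mpr (hvle a ha))
        omega
      have hcountG : s0.countP (fun x => decide (v < x)) = d.length := by
        rw [heq, List.countP_append]
        have h1 : t.countP (fun x => decide (v < x)) = 0 :=
          List.countP_eq_zero.mpr (fun a ha => by have := htlt a ha; simp; omega)
        have h2 : (v :: rest).countP (fun x => decide (v < x)) = d.length := by
          rw [← hrd, List.countP_append]
          have hrc : r.countP (fun x => decide (v < x)) = 0 :=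
            List.countP_eq_zero.mpr (fun a ha => by simp [hrv a ha])
          have hdc2 : d.countP (fun x => decide (v < x)) = d.length :=
            List.countP_eq_length.mpr (fun a ha => by simpa using hdgt a ha)
          omega
        omega
      have hlen : s0.length = t.length + r.length + d.length := by
        have := congrArg List.length hrd
        simp only [List.length_append] at this
        rw [heq, List.length_append]
        omega
      have hr1 : 1 ≤ r.length := by
        rw [hr, List.takeWhile_cons]
        simp
      have hdk : d.length ≤ k := by
        have := congrArg List.length hrd
        simp only [List.length_append] at this
        simp only [List.length_cons] at hle this
        omega
      rw [pvRunLoop]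
      by_cases hcond :
          (t.length : Int) = (s0.length : Int) - ((t.length : Int) + (r.length : Int))
      · rw [if_pos hcond]
        refine ⟨fun w hw => ?_, fun hnone => by simp at hnone⟩
        obtain rfl : v = w := by simpa using hw
        refine ⟨List.mem_cons_self, ?_⟩
        unfold pvP
        rw [hcountL, hcountG]
        omega
      · rw [if_neg hcond]
        have heq' : s0 = (t ++ r) ++ d := by
          rw [List.append_assoc, hrd, heq]
        have hlt' : ∀ x ∈ t ++ r, ∀ y ∈ d, x < y := by
          intro x hx y hy
          rcases List.mem_append.mp hx with h | h
          · exact hlt x h y (by rw [← hrd]; exact List.mem_append_right _ hy)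
          · exact (hrv x h) ▸ hdgt y hy
        have ihres := ih d (t ++ r) hdk heq' hlt'
        have hcast : ((t ++ r).length : Int) = (t.length : Int) + (r.length : Int) := by
          simp
        rw [hcast] at ihres
        refine ⟨fun w hw => ?_, fun hnone w hw => ?_⟩
        · obtain ⟨hwd, hwP⟩ := ihres.1 w hw
          exact ⟨by rw [← hrd]; exact List.mem_append_right _ hwd, hwP⟩
        · rw [← hrd] at hw
          rcases List.mem_append.mp hw with h | h
          · obtain rfl : w = v := hrv w h
            intro hP
            unfold pvP at hP
            rw [hcountL, hcountG] at hP
            exact hcond (by omega)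
          · exact ihres.2 hnone w h

-- ===== VERDICT (by name: the statement is the Claim_ definition above) =====
theorem get_mediana_spec : Claim_equal_get_mediana := by
  intro array _
  unfold Spec_get_mediana
  rw [A_eq_find]
  have hperm : (PySem.List.sorted array (fun x => x) false).Perm array :=
    PySem.List.sorted_perm array (fun x => x) false
  have hpair : (PySem.List.sorted array (fun x => x) false).Pairwise (· ≤ ·) := by
    simpa using PySem.List.sorted_pairwise array (fun x => x)
  set s := PySem.List.sorted array (fun x => x) false with hs
  have hPiff : ∀ v, pvP s v ↔ pvP array v := by
    intro v
    unfold pvP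
    rw [hperm.countP_eq, hperm.countP_eq]
  have hspec := runLoop_spec s hpair s.length s [] le_rfl (by simp) (by simp)
  simp only [List.length_nil, Nat.cast_zero] at hspec
  have halt : get_mediana_alt array = pvRunLoop (s.length : Int) 0 s := rfl
  rw [halt]
  cases hfind : array.find? (pvPb array) with
  | none =>
    have hnone := List.find?_eq_none.mp hfind
    cases hB : pvRunLoop (s.length : Int) 0 s with
    | none => rfl
    | some w =>
      obtain ⟨hws, hwP⟩ := hspec.1 w hB
      have hwa : w ∈ array := hperm.mem_iff.mp hws
      have := hnone w hwa
      rw [pvPb_iff] at this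
      exact absurd ((hPiff w).mp hwP) (by simpa using this)
  | some v =>
    have hPv : pvP array v := (pvPb_iff array v).mp (List.find?_some hfind)
    have hmem : v ∈ array := List.mem_of_find?_eq_some hfind
    cases hB : pvRunLoop (s.length : Int) 0 s with
    | none =>
      exact absurd ((hPiff v).mpr hPv) (hspec.2 hB v (hperm.mem_iff.mpr hmem))
    | some w =>
      obtain ⟨hws, hwP⟩ := hspec.1 w hB
      have hwa : w ∈ array := hperm.mem_iff.mp hws
      rw [pvP_unique hmem hwa hPv ((hPiff w).mp hwP)]
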